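-- pv_equiv track=rewrite | github.com/checkitanalytics/PeerComparison | app.py | rank_desc
-- ===== SOURCE A (Python) =====
-- def rank_desc(value, peer_values):
--     arr = sorted([x for x in peer_values if x is not None], reverse=True)
--     if value is None or not arr:
--         return None
--     try:
--         return 1 + arr.index(value)
--     except ValueError:
--         diffs = sorted([(abs(value - x), i) for i, x in enumerate(arr)])
--         return 1 + diffs[0][1]
-- ===== SOURCE B (Python) =====
-- def rank_desc(value, peer_values):
--     vals = [x for x in peer_values if x is not None]
--     if value is None or not vals:
--         return None
--     best = vals[0]
--     for x in vals[1:]: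
--         if abs(value - x) < abs(value - best) or (abs(value - x) == abs(value - best) and x > best):
--             best = x
--     return 1 + sum(1 for x in vals if x > best)
-- ===== Notes on version B (the rewrite author's own statement) =====
-- stated objective: faster
-- what changed: Replaces the descending sort plus index/second tuple-sort with two linear passes: one pass picks the peer minimizing (abs(value-x), -x) (which is value itself on an exact match), and a counting pass returns 1 + the number of peers strictly greater than it.
import Mathlib
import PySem

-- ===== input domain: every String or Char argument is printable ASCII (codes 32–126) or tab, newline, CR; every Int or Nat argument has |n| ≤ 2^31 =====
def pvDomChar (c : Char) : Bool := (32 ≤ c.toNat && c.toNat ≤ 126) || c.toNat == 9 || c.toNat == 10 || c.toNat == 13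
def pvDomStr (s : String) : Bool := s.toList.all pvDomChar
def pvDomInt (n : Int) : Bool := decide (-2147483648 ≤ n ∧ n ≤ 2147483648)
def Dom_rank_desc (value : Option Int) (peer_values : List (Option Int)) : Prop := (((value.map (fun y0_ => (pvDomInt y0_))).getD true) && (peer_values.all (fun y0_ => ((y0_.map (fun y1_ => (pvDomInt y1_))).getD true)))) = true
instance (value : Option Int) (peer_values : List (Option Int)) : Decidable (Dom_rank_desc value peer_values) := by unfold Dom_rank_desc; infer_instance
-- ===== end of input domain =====

-- ===== PORT A =====
-- B re-implements A without sorting: one pass picks the nearest peer, one pass counts the strictly greater ones (faster).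
def rank_desc (value : Option Int) (peer_values : List (Option Int)) : Option Int :=
  let arr := PySem.List.sorted (peer_values.filterMap (fun x => x)) (fun x => x) true
  match value with
  | none => none
  | some v =>
    if arr = [] then none
    else
      match PySem.List.index? arr v with
      | some i => some (1 + (i : Int))
      | none =>
        let diffs := PySem.List.sorted2 ((PySem.List.enumerate arr).map (fun p => (|v - p.2|, p.1))) Prod.fst Prod.snd
        match PySem.List.pyGet? diffs 0 with
        | some d => some (1 + d.2)
        | none => none

-- ===== PORT B =====
def rank_desc_alt (value : Option Int) (peer_values : List (Option Int)) : Option Int :=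
  let vals := peer_values.filterMap (fun x => x)
  match value, vals with
  | none, _ => none
  | some _, [] => none
  | some v, h :: t =>
    let best := t.foldl (fun b x =>
      if |v - x| < |v - b| ∨ (|v - x| = |v - b| ∧ b < x) then x else b) h
    some (1 + ((h :: t).countP (fun x => decide (best < x)) : Int))

-- ===== PRECONDITION & SPEC =====
def Spec_rank_desc (value : Option Int) (peer_values : List (Option Int)) (out : Option Int) : Prop := out = rank_desc_alt value peer_values
instance (value : Option Int) (peer_values : List (Option Int)) (out : Option Int) : Decidable (Spec_rank_desc value peer_values out) := by unfold Spec_rank_desc; infer_instance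

-- ===== CLAIM (what is proved, stated in full; the proofs are below) =====
def Claim_equal_rank_desc : Prop := ∀ (value : Option Int) (peer_values : List (Option Int)), Dom_rank_desc value peer_values → Spec_rank_desc value peer_values (rank_desc value peer_values)

-- ===== LEMMAS AND PROOFS =====

-- "x is strictly nearer to v than b" with Python's tie-break toward the larger value:
-- exactly the if-condition of B's loop (definitionally).
def pvBetter (v x b : Int) : Prop := |v - x| < |v - b| ∨ (|v - x| = |v - b| ∧ b < x)

-- B's loop body, literally.
def pvStep (v b x : Int) : Int := if |v - x| < |v - b| ∨ (|v - x| = |v - b| ∧ b < x) then x else b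

lemma pvBetter_iff (v x b : Int) : pvBetter v x b ↔
    ((v - x).natAbs < (v - b).natAbs ∨ ((v - x).natAbs = (v - b).natAbs ∧ b < x)) := by
  unfold pvBetter
  rw [Int.abs_eq_natAbs, Int.abs_eq_natAbs]
  omega

lemma pvStep_pos {v b x : Int} (h : pvBetter v x b) : pvStep v b x = x := if_pos h

lemma pvStep_neg {v b x : Int} (h : ¬ pvBetter v x b) : pvStep v b x = b := if_neg h

-- The running minimum of B's loop: the result is an element of the candidates and no candidate beats it.
lemma pvFold_min (v : Int) : ∀ (t : List Int) (b0 : Int),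
    (t.foldl (pvStep v) b0 = b0 ∨ t.foldl (pvStep v) b0 ∈ t) ∧
    (∀ x ∈ b0 :: t, ¬ pvBetter v x (t.foldl (pvStep v) b0)) := by
  intro t
  induction t with
  | nil =>
    intro b0
    refine ⟨Or.inl rfl, ?_⟩
    intro x hx
    rw [List.mem_singleton] at hx
    subst hx
    simp only [List.foldl_nil]
    rw [pvBetter_iff]
    omega
  | cons y t ih =>
    intro b0
    have hfold : (y :: t).foldl (pvStep v) b0 = t.foldl (pvStep v) (pvStep v b0 y) := rfl
    obtain ⟨hmem, hmin⟩ := ih (pvStep v b0 y)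
    constructor
    · rw [hfold]
      by_cases hc : pvBetter v y b0
      · rw [pvStep_pos hc] at hmem ⊢
        rcases hmem with h | h
        · exact Or.inr (List.mem_cons.2 (Or.inl h))
        · exact Or.inr (List.mem_cons.2 (Or.inr h))
      · rw [pvStep_neg hc] at hmem ⊢
        rcases hmem with h | h
        · exact Or.inl h
        · exact Or.inr (List.mem_cons.2 (Or.inr h))
    · intro x hx
      rw [hfold]
      rcases List.mem_cons.1 hx with rfl | hx'
      · -- x = b0
        by_cases hc : pvBetter v y x
        · have hny : ¬ pvBetter v y (t.foldl (pvStep v) (pvStep v x y)) :=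
            hmin y (List.mem_cons.2 (Or.inl (pvStep_pos hc).symm))
          intro hbx
          exact hny (by
            rw [pvBetter_iff] at hc hbx ⊢
            omega)
        · exact hmin x (List.mem_cons.2 (Or.inl (pvStep_neg hc).symm))
      · rcases List.mem_cons.1 hx' with rfl | hx''
        · -- x = y
          by_cases hc : pvBetter v x b0
          · exact hmin x (List.mem_cons.2 (Or.inl (pvStep_pos hc).symm))
          · have hnb : ¬ pvBetter v b0 (t.foldl (pvStep v) (pvStep v b0 x)) :=
              hmin b0 (List.mem_cons.2 (Or.inl (pvStep_neg hc).symm))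
            intro hbx
            exact hnb (by
              rw [pvBetter_iff] at hc hbx ⊢
              omega)
        · exact hmin x (List.mem_cons.2 (Or.inr hx''))

-- The boolean "before" relation sorted2 uses for the identity tuple key (fst, snd).
def pvLexbf (a b : Int × Int) : Bool :=
  decide (a.1 < b.1) || (!decide (b.1 < a.1) && decide (a.2 < b.2))

lemma pvLexbf_true_iff (a b : Int × Int) :
    pvLexbf a b = true ↔ (a.1 < b.1 ∨ (a.1 = b.1 ∧ a.2 < b.2)) := by
  simp only [pvLexbf, Bool.or_eq_true, Bool.and_eq_true, Bool.not_eq_true',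
    decide_eq_true_eq, decide_eq_false_iff_not]
  omega

lemma pvLexbf_false_iff (a b : Int × Int) :
    pvLexbf a b = false ↔ (b.1 < a.1 ∨ (b.1 = a.1 ∧ b.2 ≤ a.2)) := by
  rw [← Bool.not_eq_true, pvLexbf_true_iff]
  omega

lemma pvSorted2_eq (xs : List (Int × Int)) :
    PySem.List.sorted2 xs Prod.fst Prod.snd =
      xs.foldl (fun acc x => PySem.List.insertBy pvLexbf x acc) [] := rfl

lemma pvInsertBy_nil {α : Type} (bf : α → α → Bool) (x : α) :
    PySem.List.insertBy bf x [] = [x] := rfl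

lemma pvInsertBy_cons {α : Type} (bf : α → α → Bool) (x y : α) (ys : List α) :
    PySem.List.insertBy bf x (y :: ys) =
      if bf x y then x :: y :: ys else y :: PySem.List.insertBy bf x ys := rfl

lemma pvInsert_pw (x : Int × Int) : ∀ (ys : List (Int × Int)),
    ys.Pairwise (fun a b => pvLexbf b a = false) →
    (PySem.List.insertBy pvLexbf x ys).Pairwise (fun a b => pvLexbf b a = false) := by
  intro ys
  induction ys with
  | nil =>
    intro _
    rw [pvInsertBy_nil]
    simp
  | cons y ys ih =>
    intro h
    rw [pvInsertBy_cons]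
    obtain ⟨hy, ht⟩ := List.pairwise_cons.1 h
    by_cases hb : pvLexbf x y = true
    · rw [if_pos hb]
      refine List.pairwise_cons.2 ⟨?_, h⟩
      intro z hz
      rcases List.mem_cons.1 hz with rfl | hz'
      · rw [pvLexbf_true_iff] at hb
        rw [pvLexbf_false_iff]
        omega
      · have hzy := hy z hz'
        rw [pvLexbf_true_iff] at hb
        rw [pvLexbf_false_iff] at hzy ⊢
        omega
    · rw [if_neg hb]
      refine List.pairwise_cons.2 ⟨?_, ih ht⟩
      intro z hz
      rcases (PySem.List.mem_insertBy pvLexbf x z ys).1 hz with rfl | hz'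
      · exact Bool.eq_false_iff.2 hb
      · exact hy z hz'

lemma pvFoldIns_pw : ∀ (xs acc : List (Int × Int)),
    acc.Pairwise (fun a b => pvLexbf b a = false) →
    (xs.foldl (fun acc x => PySem.List.insertBy pvLexbf x acc) acc).Pairwise
      (fun a b => pvLexbf b a = false) := by
  intro xs
  induction xs with
  | nil => intro acc h; exact h
  | cons x xs ih => intro acc h; exact ih _ (pvInsert_pw x acc h)

-- The head of sorted2 (identity tuple key) is a lexicographic minimum.
lemma pvHead_min (xs : List (Int × Int)) (m : Int × Int) (t : List (Int × Int))
    (h : PySem.List.sorted2 xs Prod.fst Prod.snd = m :: t) :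
    ∀ y ∈ xs, pvLexbf y m = false := by
  have hpw : (m :: t).Pairwise (fun a b => pvLexbf b a = false) := by
    rw [← h, pvSorted2_eq]
    exact pvFoldIns_pw xs [] (List.Pairwise.nil)
  have hperm : (m :: t).Perm xs := h ▸ PySem.List.sorted2_perm xs Prod.fst Prod.snd false
  intro y hy
  rcases List.mem_cons.1 (hperm.mem_iff.2 hy) with rfl | hy'
  · simp [pvLexbf]
  · exact (List.pairwise_cons.1 hpw).1 y hy'

-- Counting: if p holds exactly on the first k0 positions, countP = k0.
lemma pvCountP_eq (l : List Int) (p : Int → Bool) (k0 : Nat) (hk : k0 ≤ l.length)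
    (h : ∀ (k : Nat) (hkl : k < l.length), p l[k] = decide (k < k0)) :
    l.countP p = k0 := by
  conv_lhs => rw [← List.take_append_drop k0 l]
  rw [List.countP_append]
  have h1 : (l.take k0).countP p = (l.take k0).length := by
    rw [List.countP_eq_length]
    intro a ha
    obtain ⟨i, hi, hia⟩ := List.mem_iff_getElem.1 ha
    have hi' : i < k0 := lt_of_lt_of_le hi (by simp)
    have hil : i < l.length := lt_of_lt_of_le hi' hk
    rw [← hia, List.getElem_take, h i hil]
    simp [hi']
  have h2 : (l.drop k0).countP p = 0 := by
    rw [List.countP_eq_zero]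
    intro a ha
    obtain ⟨i, hi, hia⟩ := List.mem_iff_getElem.1 ha
    have hil : k0 + i < l.length := by
      have := hi
      simp [List.length_drop] at this
      omega
    rw [← hia, List.getElem_drop, h (k0 + i) hil]
    simp
  rw [h1, h2, List.length_take]
  omega

-- In a descending list, if b sits at position k0 and everything before it is > b,
-- the count of elements strictly greater than b is exactly k0.
lemma pvRank (arr : List Int) (hdesc : arr.Pairwise (fun a b => b ≤ a)) (b : Int)
    (k0 : Nat) (hk : k0 < arr.length) (hb : arr[k0] = b)
    (hgt : ∀ (k : Nat) (h : k < arr.length), k < k0 → b < arr[k]) :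
    arr.countP (fun x => decide (b < x)) = k0 := by
  apply pvCountP_eq _ _ k0 (le_of_lt hk)
  intro k hkl
  by_cases hlt : k < k0
  · simp [hgt k hkl hlt, hlt]
  · have hle : arr[k] ≤ b := by
      rcases Nat.lt_or_ge k0 k with hc | hc
      · have := (List.pairwise_iff_getElem.1 hdesc) k0 k hk hkl hc
        omega
      · have : k = k0 := by omega
        subst this
        omega
    simp [hlt, not_lt.2 hle]

-- sorted (reverse) with identity key is descending.
lemma pvSorted_desc (L : List Int) :
    (PySem.List.sorted L (fun x => x) true).Pairwise (fun a b => b ≤ a) := by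
  have := PySem.List.sorted_pairwise_rev (xs := L) (key := fun x => x)
  simpa using this

-- Main equality, by cases on A's branches.
lemma pvKey (value : Option Int) (pv : List (Option Int)) :
    rank_desc value pv = rank_desc_alt value pv := by
  cases value with
  | none => rfl
  | some v =>
    simp only [rank_desc, rank_desc_alt]
    cases hL : pv.filterMap (fun x => x) with
    | nil => rfl
    | cons hh t =>
      have hstep : (fun (b x : Int) =>
          if |v - x| < |v - b| ∨ (|v - x| = |v - b| ∧ b < x) then x else b) = pvStep v := rfl
      change _ = some (1 + (((hh :: t).countP
        (fun x => decide ((t.foldl (fun (b x : Int) =>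
          if |v - x| < |v - b| ∨ (|v - x| = |v - b| ∧ b < x) then x else b) hh) < x)) : Nat) : Int))
      rw [hstep]
      have hdesc := pvSorted_desc (hh :: t)
      have hperm : (PySem.List.sorted (hh :: t) (fun x => x) true).Perm (hh :: t) :=
        PySem.List.sorted_perm (hh :: t) (fun x => x) true
      set arr := PySem.List.sorted (hh :: t) (fun x => x) true with harr
      have hnil : ¬ arr = [] := by
        rw [harr, PySem.List.sorted_eq_nil_iff]
        simp
      rw [if_neg hnil]
      have hbest := pvFold_min v t hh
      set best := t.foldl (pvStep v) hh with hbestdef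
      have hbmem : best ∈ hh :: t := by
        rcases hbest.1 with h | h
        · rw [h]; exact List.mem_cons_self
        · exact List.mem_cons.2 (Or.inr h)
      cases hidx : PySem.List.index? arr v with
      | some i =>
        obtain ⟨hi, hiv, hprev⟩ := PySem.List.getElem_of_index?_eq_some hidx
        have hvmem : v ∈ hh :: t := hperm.mem_iff.1 (hiv ▸ arr.getElem_mem hi)
        have hveq : best = v := by
          have hnb := hbest.2 v hvmem
          rw [pvBetter_iff] at hnb
          omega
        have hcount : arr.countP (fun x => decide (v < x)) = i := by
          apply pvRank arr hdesc v i hi hiv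
          intro k hk hki
          have hge := (List.pairwise_iff_getElem.1 hdesc) k i hk hi hki
          have hne : arr[k] ≠ v := hprev k hki
          omega
        have hcount2 : (hh :: t).countP (fun x => decide (v < x)) = i :=
          (hperm.countP_eq _).symm.trans hcount
        rw [hveq, hcount2]
      | none =>
        set dlist := (PySem.List.enumerate arr).map (fun p => (|v - p.2|, p.1)) with hdl
        cases hd : PySem.List.sorted2 dlist Prod.fst Prod.snd with
        | nil =>
          exfalso
          have hp : List.Perm [] dlist := hd ▸ PySem.List.sorted2_perm dlist Prod.fst Prod.snd false
          have hdn : dlist = [] := hp.symm.eq_nil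
          rw [hdl] at hdn
          have hlen := congrArg List.length hdn
          simp [PySem.List.length_enumerate] at hlen
          exact hnil hlen
        | cons m t' =>
          have hget : PySem.List.pyGet? (m :: t') 0 = some m := by
            simp [PySem.List.pyGet?, PySem.List.pyIdx?]
          rw [hget]
          change some (1 + m.2) = _
          have hminh := pvHead_min dlist m t' hd
          have hmmem : m ∈ dlist :=
            (hd ▸ PySem.List.sorted2_perm dlist Prod.fst Prod.snd false).mem_iff.1
              List.mem_cons_self
          rw [hdl] at hmmem
          obtain ⟨p, hp, hpm⟩ := List.mem_map.1 hmmem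
          obtain ⟨k0, hk0, hpk⟩ := (PySem.List.mem_enumerate_iff _ _ _).1 hp
          subst hpk
          dsimp only at hpm
          subst hpm
          dsimp only
          have F1 : ∀ (k : Nat) (hk : k < arr.length),
              (v - arr[k0]).natAbs < (v - arr[k]).natAbs ∨
              ((v - arr[k0]).natAbs = (v - arr[k]).natAbs ∧ k0 ≤ k) := by
            intro k hk
            have hmem' : ((|v - arr[k]|, ((0 : Int) + (k : Int))) : Int × Int) ∈ dlist := by
              rw [hdl]
              exact List.mem_map.2
                ⟨(((0 : Int) + (k : Int)), arr[k]),
                 (PySem.List.mem_enumerate_iff _ _ _).2 ⟨k, hk, rfl⟩, rfl⟩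
            have h := hminh _ hmem'
            rw [pvLexbf_false_iff] at h
            dsimp only at h
            simp only [Int.abs_eq_natAbs] at h
            omega
          have hgt : ∀ (k : Nat) (h : k < arr.length), k < k0 → arr[k0] < arr[k] := by
            intro k hk hkk
            have hge := (List.pairwise_iff_getElem.1 hdesc) k k0 hk hk0 hkk
            rcases F1 k hk with h | ⟨h1, h2⟩
            · omega
            · omega
          have hcount : arr.countP (fun x => decide (arr[k0] < x)) = k0 :=
            pvRank arr hdesc arr[k0] k0 hk0 rfl hgt
          have hb0mem : arr[k0] ∈ hh :: t := hperm.mem_iff.1 (arr.getElem_mem hk0)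
          have hb0min : ∀ x ∈ hh :: t, ¬ pvBetter v x arr[k0] := by
            intro x hx hbet
            obtain ⟨k, hk, hxk⟩ := List.mem_iff_getElem.1 (hperm.mem_iff.2 hx)
            rw [pvBetter_iff] at hbet
            rcases F1 k hk with h | ⟨h1, h2⟩
            · omega
            · have hle : arr[k] ≤ arr[k0] := by
                rcases Nat.eq_or_lt_of_le h2 with h3 | h3
                · subst h3; exact le_refl _
                · exact (List.pairwise_iff_getElem.1 hdesc) k0 k hk0 hk h3
              omega
          have huniq : best = arr[k0] := by
            by_contra hne
            have h1 := hbest.2 arr[k0] hb0mem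
            have h2 := hb0min best hbmem
            rw [pvBetter_iff] at h1 h2
            omega
          have hcount2 : (hh :: t).countP (fun x => decide (arr[k0] < x)) = k0 :=
            (hperm.countP_eq _).symm.trans hcount
          rw [huniq, hcount2]
          norm_num

-- ===== VERDICT (by name: the statement is the Claim_ definition above) =====
theorem rank_desc_spec : Claim_equal_rank_desc := by
  intro value pv _
  unfold Spec_rank_desc
  exact pvKey value pv
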